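-- pv_equiv track=rewrite | github.com/hannanabdul55/zoltpy | zoltpy/quantile_io.py | summarized_error_messages
-- ===== SOURCE A (Python) =====
-- from collections import defaultdict
--
-- def summarized_error_messages(error_messages, max_num_dups=10):
--     """
--     Utility function that does two things: 1) shortens error_messages list by removing all but a small number of similar
--     messages. "similar" is determined by simply looking at the first 20 characters being equal. adds '...' if any were
--      omitted, and 2) orders the messages according to the first item in each 2-tuple.
--
--     :param error_messages: list of 2-tuples as returned by `json_io_dict_from_quantile_csv_file()`
--     :param max_num_dups: integer maximum number of duplicated lines to return
--     :return: shortened and sorted copy of the second tuple item in error_messages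
--     """
--     error_messages = [_[1] for _ in sorted(error_messages)]
--     error_key_to_max_messages = defaultdict(list)  # key: first N chars of any unique message
--     for error_message in error_messages:
--         error_key = error_message[:20]
--         if (error_key not in error_key_to_max_messages) or (len(error_key_to_max_messages[error_key]) < max_num_dups):
--             error_key_to_max_messages[error_key].append(error_message)
--
--     # per https://stackoverflow.com/questions/952914/how-to-make-a-flat-list-out-of-list-of-lists :
--     # return [item for sublist in error_key_to_max_messages.values() for item in sublist]
--
--     error_messages = []  # return value
--     for error_key, max_messages in error_key_to_max_messages.items():
--         error_messages.extend(max_messages)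
--         # note that this adds '...' in the case of exactly max_num_dups, which may be misleading b/c it's max + 1 total
--         if len(max_messages) == max_num_dups:
--             error_messages.append(error_key + '...')
--     return error_messages
-- ===== SOURCE B (Python) =====
-- def summarized_error_messages(error_messages, max_num_dups=10):
--     msgs = [t[1] for t in sorted(error_messages)]
--     out = []
--     for key in dict.fromkeys(m[:20] for m in msgs):
--         group = [m for m in msgs if m[:20] == key]
--         out.extend(group[:max_num_dups])
--         if len(group) >= max_num_dups:
--             out.append(key + '...')
--     return out
-- ===== Notes on version B (the rewrite author's own statement) =====
-- stated objective: simpler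
-- what changed: Replaces A's incrementally maintained defaultdict of capped per-key lists plus a second pass over the dict with a single loop over the deduplicated 20-char prefixes that filters the sorted messages per prefix and slices off the kept head; Pre_ excludes non-positive max_num_dups, a degenerate cap nobody would specify behaviour for, on which A accidentally keeps the first message of each group while B keeps the plain slice and marks every group elided.
-- outside the precondition, e.g. on summarized_error_messages([('a', 'e1'), ('b', 'e2')], 0): A returns ['e1', 'e2'], B returns ['e1...', 'e2...']
import Mathlib
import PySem

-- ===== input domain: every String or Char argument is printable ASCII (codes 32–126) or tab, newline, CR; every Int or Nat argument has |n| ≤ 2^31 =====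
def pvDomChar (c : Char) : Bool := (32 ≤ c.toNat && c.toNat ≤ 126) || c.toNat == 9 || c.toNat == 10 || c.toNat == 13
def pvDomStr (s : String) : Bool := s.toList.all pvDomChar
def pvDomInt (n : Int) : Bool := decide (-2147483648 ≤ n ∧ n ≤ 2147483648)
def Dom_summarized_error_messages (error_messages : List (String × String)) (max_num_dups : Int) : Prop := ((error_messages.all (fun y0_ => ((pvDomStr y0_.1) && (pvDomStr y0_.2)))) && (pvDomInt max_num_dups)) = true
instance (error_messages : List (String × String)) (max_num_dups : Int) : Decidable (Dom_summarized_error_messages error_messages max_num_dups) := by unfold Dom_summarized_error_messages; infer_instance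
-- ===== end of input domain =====

-- B replaces A's incrementally maintained defaultdict of capped per-key lists (plus a second pass
-- over the dict) with one loop over the deduplicated 20-char prefixes that filters and slices the
-- sorted messages per prefix — simpler: no hash map of partial lists is maintained.


-- ===== PORT A =====
def summarized_error_messages (error_messages : List (String × String)) (max_num_dups : Int) : List String :=
  let error_messages1 := (PySem.List.sorted2 error_messages (fun t => t.1) (fun t => t.2)).map (fun t => t.2)
  let error_key_to_max_messages :=
    error_messages1.foldl (fun d error_message =>
      let error_key := PySem.Str.slice error_message none (some 20)
      if d.contains error_key = false ∨ ((d.getD error_key []).length : Int) < max_num_dups then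
        d.modify error_key [] (fun v => v ++ [error_message])   -- defaultdict(list): d[key].append(m)
      else d) (PySem.Dict.empty : PySem.Dict String (List String))
  error_key_to_max_messages.items.foldl (fun out p =>
    let out := out ++ p.2
    if (p.2.length : Int) = max_num_dups then out ++ [p.1 ++ "..."] else out) []

-- ===== PORT B =====
def summarized_error_messages_alt (error_messages : List (String × String)) (max_num_dups : Int) : List String :=
  let msgs := (PySem.List.sorted2 error_messages (fun t => t.1) (fun t => t.2)).map (fun t => t.2)
  (PySem.List.dedup (msgs.map (fun m => PySem.Str.slice m none (some 20)))).foldl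
    (fun out key =>
      let group := msgs.filter (fun m => PySem.Str.slice m none (some 20) == key)
      let out := out ++ PySem.List.slice group none (some max_num_dups)
      if max_num_dups ≤ (group.length : Int) then out ++ [key ++ "..."] else out) []

-- ===== PRECONDITION & SPEC =====
-- Pre_ excludes non-positive max_num_dups, a degenerate cap for which no behaviour is specified:
-- there A accidentally keeps the first message of each group, while B keeps the plain slice and
-- marks every group elided — neither value is one anyone would specify.
def Pre_summarized_error_messages (error_messages : List (String × String)) (max_num_dups : Int) : Prop := 1 ≤ max_num_dups
instance (error_messages : List (String × String)) (max_num_dups : Int) : Decidable (Pre_summarized_error_messages error_messages max_num_dups) := by unfold Pre_summarized_error_messages; infer_instance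
def pvWitness_summarized_error_messages : (List (String × String)) × Int := ([("loc1", "bad row"), ("loc2", "bad row two")], 2)

def Spec_summarized_error_messages (error_messages : List (String × String)) (max_num_dups : Int) (out : List String) : Prop := out = summarized_error_messages_alt error_messages max_num_dups
instance (error_messages : List (String × String)) (max_num_dups : Int) (out : List String) : Decidable (Spec_summarized_error_messages error_messages max_num_dups out) := by unfold Spec_summarized_error_messages; infer_instance

-- ===== CLAIM (what is proved, stated in full; the proofs are below) =====
def Claim_equal_summarized_error_messages : Prop := ∀ (error_messages : List (String × String)) (max_num_dups : Int), Dom_summarized_error_messages error_messages max_num_dups → Pre_summarized_error_messages error_messages max_num_dups → Spec_summarized_error_messages error_messages max_num_dups (summarized_error_messages error_messages max_num_dups)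

-- ===== LEMMAS AND PROOFS =====

def pvPref (m : String) : String := PySem.Str.slice m none (some 20)
def pvCap (mnd : Int) : Nat := (max 1 mnd).toNat
def pvSpecDict (msgs : List String) (mnd : Int) : PySem.Dict String (List String) :=
  PySem.Dict.mk ((PySem.Set.ofList (msgs.map pvPref)).map
    (fun k => (k, (msgs.filter (fun m => pvPref m == k)).take (pvCap mnd))))

lemma pvCap_pos (mnd : Int) : 1 ≤ pvCap mnd := by unfold pvCap; omega

lemma pvStep (l : List String) (m : String) (mnd : Int) :
    (if (pvSpecDict l mnd).contains (pvPref m) = false ∨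
        (((pvSpecDict l mnd).getD (pvPref m) []).length : Int) < mnd then
      (pvSpecDict l mnd).modify (pvPref m) [] (fun v => v ++ [m])
    else pvSpecDict l mnd) = pvSpecDict (l ++ [m]) mnd := by
  have hnodup : (PySem.Set.ofList (l.map pvPref)).Nodup := PySem.Set.nodup_ofList _
  have hkeys : (pvSpecDict l mnd).keys = PySem.Set.ofList (l.map pvPref) := by
    simp [pvSpecDict, PySem.Dict.keys, Function.comp_def]
  have hKnew : PySem.Set.ofList ((l ++ [m]).map pvPref)
      = PySem.Set.add (PySem.Set.ofList (l.map pvPref)) (pvPref m) := by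
    simp [PySem.Set.ofList_eq_foldl, List.foldl_append]
  have hmod : ∀ (d : PySem.Dict String (List String)),
      d.modify (pvPref m) [] (fun v => v ++ [m]) = d.insert (pvPref m) (d.getD (pvPref m) [] ++ [m]) :=
    fun d => rfl
  by_cases hmem : pvPref m ∈ PySem.Set.ofList (l.map pvPref)
  · -- key already present
    have hcont : (pvSpecDict l mnd).contains (pvPref m) = true := by
      rw [PySem.Dict.contains_eq_decide_mem_keys, hkeys]; simp [hmem]
    have hfil : ∃ m', m' ∈ l.filter (fun x => pvPref x == pvPref m) := by
      rw [PySem.Set.mem_ofList] at hmem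
      obtain ⟨m', hm', hp⟩ := List.mem_map.mp hmem
      exact ⟨m', List.mem_filter.mpr ⟨hm', by simp [hp]⟩⟩
    obtain ⟨m0, hm0⟩ := hfil
    have hfl : 1 ≤ (l.filter (fun x => pvPref x == pvPref m)).length :=
      List.length_pos_of_mem hm0
    have hget : (pvSpecDict l mnd).getD (pvPref m) []
        = (l.filter (fun x => pvPref x == pvPref m)).take (pvCap mnd) := by
      apply PySem.Dict.getD_of_mem_items
      · show ((pvPref m), _) ∈ _
        exact List.mem_map.mpr ⟨pvPref m, hmem, rfl⟩
      · rw [hkeys]; exact hnodup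
    have hAddK : PySem.Set.add (PySem.Set.ofList (l.map pvPref)) (pvPref m)
        = PySem.Set.ofList (l.map pvPref) := by
      unfold PySem.Set.add; simp [PySem.Set.contains, hmem]
    have hlen : ((pvSpecDict l mnd).getD (pvPref m) []).length
        = min (pvCap mnd) (l.filter (fun x => pvPref x == pvPref m)).length := by
      rw [hget]; simp [List.length_take]
    by_cases hlt : (((pvSpecDict l mnd).getD (pvPref m) []).length : Int) < mnd
    · -- still below the cap: append
      rw [if_pos (Or.inr hlt), hmod, hget]
      have hflcap : (l.filter (fun x => pvPref x == pvPref m)).length < pvCap mnd := by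
        rw [hlen] at hlt; unfold pvCap at *; omega
      apply PySem.Dict.ext
      rw [PySem.Dict.items_insert_of_contains _ _ hcont]
      show ((PySem.Set.ofList (l.map pvPref)).map _).map _
          = (PySem.Set.ofList ((l ++ [m]).map pvPref)).map _
      rw [hKnew, hAddK, List.map_map]
      apply List.map_congr_left
      intro k' hk'
      by_cases hkk : k' = pvPref m
      · subst hkk
        have htk : (l.filter (fun x => pvPref x == pvPref m)).take (pvCap mnd)
            = l.filter (fun x => pvPref x == pvPref m) :=
          List.take_of_length_le (le_of_lt hflcap)
        have h2 : ((l.filter (fun x => pvPref x == pvPref m)) ++ [m]).length ≤ pvCap mnd := by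
          simp; omega
        simp [List.filter_append, htk, List.take_of_length_le h2]
      · have hpm : (pvPref m == k') = false := beq_false_of_ne (Ne.symm hkk)
        have hbeq : (k' == pvPref m) = false := beq_false_of_ne hkk
        simp [Function.comp, hbeq, List.filter_append, hpm]
    · -- at the cap: unchanged
      rw [if_neg (by
        rintro (h | h)
        · simp [hcont] at h
        · exact hlt h)]
      apply PySem.Dict.ext
      show (PySem.Set.ofList (l.map pvPref)).map _
          = (PySem.Set.ofList ((l ++ [m]).map pvPref)).map _
      rw [hKnew, hAddK]
      apply List.map_congr_left
      intro k' hk'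
      by_cases hkk : k' = pvPref m
      · subst hkk
        have hcaple : pvCap mnd ≤ (l.filter (fun x => pvPref x == pvPref m)).length := by
          rw [hlen] at hlt; unfold pvCap at *; omega
        simp [List.filter_append, List.take_append_of_le_length hcaple]
      · have hpm : (pvPref m == k') = false := beq_false_of_ne (Ne.symm hkk)
        simp [List.filter_append, hpm]
  · -- fresh key
    have hcont : (pvSpecDict l mnd).contains (pvPref m) = false := by
      rw [PySem.Dict.contains_eq_decide_mem_keys, hkeys]; simp [hmem]
    rw [if_pos (Or.inl hcont), hmod, PySem.Dict.getD_of_not_contains _ _ hcont]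
    apply PySem.Dict.ext
    rw [PySem.Dict.items_insert_of_not_contains _ _ hcont]
    show (PySem.Set.ofList (l.map pvPref)).map _ ++ [((pvPref m), [] ++ [m])]
        = (PySem.Set.ofList ((l ++ [m]).map pvPref)).map _
    have hAddK : PySem.Set.add (PySem.Set.ofList (l.map pvPref)) (pvPref m)
        = PySem.Set.ofList (l.map pvPref) ++ [pvPref m] := by
      unfold PySem.Set.add; simp [PySem.Set.contains, hmem]
    rw [hKnew, hAddK, List.map_append]
    congr 1
    · apply List.map_congr_left
      intro k' hk'
      have hpm : (pvPref m == k') = false :=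
        beq_false_of_ne (fun h => hmem (h ▸ hk'))
      simp [List.filter_append, hpm]
    · have hfilnil : l.filter (fun x => pvPref x == pvPref m) = [] := by
        rw [List.filter_eq_nil_iff]
        intro x hx hbx
        exact hmem ((PySem.Set.mem_ofList _ _).mpr (List.mem_map.mpr ⟨x, hx, by simpa using hbx⟩))
      have h1 : ([m] : List String).length ≤ pvCap mnd := by simpa using pvCap_pos mnd
      simp [List.filter_append, hfilnil, List.take_of_length_le h1]

def stepA (mnd : Int) (d : PySem.Dict String (List String)) (m : String) : PySem.Dict String (List String) :=
  if d.contains (PySem.Str.slice m none (some 20)) = false ∨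
     ((d.getD (PySem.Str.slice m none (some 20)) []).length : Int) < mnd then
    d.modify (PySem.Str.slice m none (some 20)) [] (fun v => v ++ [m])
  else d

lemma pvDict_char (msgs : List String) (mnd : Int) :
    msgs.foldl (stepA mnd) PySem.Dict.empty = pvSpecDict msgs mnd := by
  induction msgs using List.reverseRecOn with
  | nil => rfl
  | append_singleton l m ih =>
    rw [List.foldl_append, ih]
    simpa [stepA, pvPref] using pvStep l m mnd

theorem pv_main (error_messages : List (String × String)) (max_num_dups : Int)
    (hpos : 1 ≤ max_num_dups) :
    summarized_error_messages error_messages max_num_dups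
      = summarized_error_messages_alt error_messages max_num_dups := by
  unfold summarized_error_messages summarized_error_messages_alt
  set msgs := (PySem.List.sorted2 error_messages (fun t => t.1) (fun t => t.2)).map (fun t => t.2)
  show (msgs.foldl (stepA max_num_dups) PySem.Dict.empty).items.foldl _ [] = _
  rw [pvDict_char]
  simp only [PySem.List.dedup_eq_ofList]
  unfold pvSpecDict
  show List.foldl _ [] (List.map _ _) = _
  rw [List.foldl_map]
  have hpr : (msgs.map (fun m => PySem.Str.slice m none (some 20))) = msgs.map pvPref := by
    simp [pvPref]
  rw [hpr]
  apply PySem.List.foldl_congr_mem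
  intro acc k hkmem
  have hcast : max_num_dups = ((pvCap max_num_dups : Nat) : Int) := by unfold pvCap; omega
  have hslice : PySem.List.slice (msgs.filter (fun m => PySem.Str.slice m none (some 20) == k)) none (some max_num_dups)
      = (msgs.filter (fun m => pvPref m == k)).take (pvCap max_num_dups) := by
    conv_lhs => rw [hcast]
    rw [PySem.List.slice_to_natCast]
    simp [pvPref]
  have hiff : (((msgs.filter (fun m => pvPref m == k)).take (pvCap max_num_dups)).length : Int) = max_num_dups
      ↔ (max_num_dups ≤ ((msgs.filter (fun m => PySem.Str.slice m none (some 20) == k)).length : Int)) := by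
    have : (msgs.filter (fun m => PySem.Str.slice m none (some 20) == k)) = msgs.filter (fun m => pvPref m == k) := by
      simp [pvPref]
    rw [this, List.length_take]
    unfold pvCap
    constructor
    · intro h; push_cast at h ⊢; omega
    · intro h; push_cast at h ⊢; omega
  simp only []
  rw [hslice, if_congr hiff rfl rfl]

-- ===== VERDICT (by name: the statement is the Claim_ definition above) =====
theorem summarized_error_messages_spec : Claim_equal_summarized_error_messages := by
  intro ems mnd _ hpre
  unfold Spec_summarized_error_messages
  exact pv_main ems mnd hpre
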